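-- pv_equiv track=rewrite | github.com/henryk4pp/Programmeerimise-alused-2 | 2.61.Sudoku.py | ruut_3x3_on_korras
-- ===== SOURCE A (Python) =====
-- def ruut_3x3_on_korras(tabel,nurga_rea_indeks,nurga_veeru_indeks):
--     numbrid = []
--     for i in range(nurga_rea_indeks-3,nurga_rea_indeks):
--         for j in range(nurga_veeru_indeks-3,nurga_veeru_indeks):
--             numbrid.append(tabel[i][j])
--     if len(set(numbrid)) == 9:
--         return True
--     else:
--         return False
-- ===== SOURCE B (Python) =====
-- def ruut_3x3_on_korras(tabel, nurga_rea_indeks, nurga_veeru_indeks):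
--     def koik_erinevad(vaartused):
--         if not vaartused:
--             return True
--         return vaartused[0] not in vaartused[1:] and koik_erinevad(vaartused[1:])
--     vaartused = [tabel[nurga_rea_indeks - 3 + k // 3][nurga_veeru_indeks - 3 + k % 3]
--                  for k in range(9)]
--     return koik_erinevad(vaartused)
-- ===== Notes on version B (the rewrite author's own statement) =====
-- stated objective: alternative
-- what changed: B reads the nine cells in one flattened loop over range(9) using k//3 and k%3 instead of nested row/column loops, and decides distinctness by a head-vs-rest recursion (first element not in the tail, recurse on the tail) instead of building a hash set and comparing its size to 9.
import Mathlib
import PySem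

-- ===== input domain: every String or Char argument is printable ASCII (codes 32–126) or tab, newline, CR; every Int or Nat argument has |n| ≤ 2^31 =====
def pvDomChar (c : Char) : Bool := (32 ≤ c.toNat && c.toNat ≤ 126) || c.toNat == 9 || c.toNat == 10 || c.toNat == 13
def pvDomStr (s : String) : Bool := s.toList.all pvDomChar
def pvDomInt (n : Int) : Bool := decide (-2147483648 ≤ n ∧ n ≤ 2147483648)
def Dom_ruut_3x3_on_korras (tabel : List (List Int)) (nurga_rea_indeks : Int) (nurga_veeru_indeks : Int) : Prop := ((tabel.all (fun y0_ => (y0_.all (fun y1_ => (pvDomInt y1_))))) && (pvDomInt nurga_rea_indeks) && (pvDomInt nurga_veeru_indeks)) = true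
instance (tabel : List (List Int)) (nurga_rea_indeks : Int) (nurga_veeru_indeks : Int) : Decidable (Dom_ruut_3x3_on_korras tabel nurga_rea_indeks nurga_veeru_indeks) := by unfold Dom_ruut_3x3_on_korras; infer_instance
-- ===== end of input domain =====

-- B reads the block with one flattened loop (k//3, k%3) and decides distinctness by a
-- head-vs-rest recursion, instead of A's nested loops plus hash-set-size-equals-9 test.

-- ===== PORT A =====
-- literal transliteration of A: nested loops append tabel[i][j], then len(set(numbrid)) == 9
def ruut_3x3_on_korras (tabel : List (List Int)) (nurga_rea_indeks : Int) (nurga_veeru_indeks : Int) : Bool :=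
  let numbrid : List Int :=
    (PySem.List.pyRange (nurga_rea_indeks - 3) nurga_rea_indeks 1).foldl (fun acc i =>
      (PySem.List.pyRange (nurga_veeru_indeks - 3) nurga_veeru_indeks 1).foldl (fun acc2 j =>
        acc2 ++ [PySem.List.pyGetD (PySem.List.pyGetD tabel i []) j 0]) acc) []
  if (PySem.Set.ofList numbrid).length == 9 then true else false

-- ===== PORT B =====
-- literal transliteration of B's helper: empty → True, else head not in tail and recurse on tail
-- (vaartused[1:] is the tail; 'in' is List.contains)
def koikErinevad : List Int → Bool
  | [] => true
  | x :: t => !(t.contains x) && koikErinevad t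

-- literal transliteration of B: flattened comprehension over range(9) with k//3, k%3, then recursion
def ruut_3x3_on_korras_alt (tabel : List (List Int)) (nurga_rea_indeks : Int) (nurga_veeru_indeks : Int) : Bool :=
  let vaartused : List Int :=
    (PySem.List.pyRange 0 9 1).map (fun k =>
      PySem.List.pyGetD
        (PySem.List.pyGetD tabel (nurga_rea_indeks - 3 + PySem.Int.floordiv k 3) [])
        (nurga_veeru_indeks - 3 + PySem.Int.mod k 3) 0)
  koikErinevad vaartused

-- ===== PRECONDITION & SPEC =====
-- Pre_ excludes exactly the inputs where Python A raises IndexError: every row index of the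
-- block must be a valid Python index into tabel, and every column index into that row.
def Pre_ruut_3x3_on_korras (tabel : List (List Int)) (nurga_rea_indeks : Int) (nurga_veeru_indeks : Int) : Prop :=
  ∀ i ∈ PySem.List.pyRange (nurga_rea_indeks - 3) nurga_rea_indeks 1,
    PySem.Raise.InRange tabel.length i ∧
    ∀ j ∈ PySem.List.pyRange (nurga_veeru_indeks - 3) nurga_veeru_indeks 1,
      PySem.Raise.InRange (PySem.List.pyGetD tabel i []).length j
instance (tabel : List (List Int)) (nurga_rea_indeks : Int) (nurga_veeru_indeks : Int) : Decidable (Pre_ruut_3x3_on_korras tabel nurga_rea_indeks nurga_veeru_indeks) := by unfold Pre_ruut_3x3_on_korras; infer_instance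

def pvWitness_ruut_3x3_on_korras : List (List Int) × Int × Int :=
  ([[1, 2, 3], [4, 5, 6], [7, 8, 9]], 3, 3)

def Spec_ruut_3x3_on_korras (tabel : List (List Int)) (nurga_rea_indeks : Int) (nurga_veeru_indeks : Int) (out : Bool) : Prop := out = ruut_3x3_on_korras_alt tabel nurga_rea_indeks nurga_veeru_indeks
instance (tabel : List (List Int)) (nurga_rea_indeks : Int) (nurga_veeru_indeks : Int) (out : Bool) : Decidable (Spec_ruut_3x3_on_korras tabel nurga_rea_indeks nurga_veeru_indeks out) := by unfold Spec_ruut_3x3_on_korras; infer_instance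

-- ===== CLAIM (what is proved, stated in full; the proofs are below) =====
def Claim_equal_ruut_3x3_on_korras : Prop := ∀ (tabel : List (List Int)) (nurga_rea_indeks : Int) (nurga_veeru_indeks : Int), Dom_ruut_3x3_on_korras tabel nurga_rea_indeks nurga_veeru_indeks → Pre_ruut_3x3_on_korras tabel nurga_rea_indeks nurga_veeru_indeks → Spec_ruut_3x3_on_korras tabel nurga_rea_indeks nurga_veeru_indeks (ruut_3x3_on_korras tabel nurga_rea_indeks nurga_veeru_indeks)

-- ===== LEMMAS AND PROOFS =====

-- B's recursion decides exactly Nodup.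
lemma koikErinevad_iff (l : List Int) : koikErinevad l = true ↔ l.Nodup := by
  induction l with
  | nil => simp [koikErinevad]
  | cons x t ih => simp [koikErinevad, ih, List.nodup_cons]

-- set(l) has as many elements as l exactly when l has no duplicates.
lemma ofList_len_iff (l : List Int) : (PySem.Set.ofList l).length = l.length ↔ l.Nodup := by
  constructor
  · intro h
    have hperm : (PySem.Set.ofList l).Perm l.dedup := by
      rw [List.perm_ext_iff_of_nodup (PySem.Set.nodup_ofList l) l.nodup_dedup]
      intro a; rw [PySem.Set.mem_ofList, List.mem_dedup]
    have hlen : l.dedup.length = l.length := hperm.length_eq ▸ h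
    have : l.dedup = l := List.Sublist.eq_of_length l.dedup_sublist hlen
    exact List.dedup_eq_self.mp this
  · intro h; rw [PySem.Set.ofList_eq_self_of_nodup l h]

-- A's set-size test equals B's recursion on any 9-element list.
lemma core_eq (l : List Int) (h9 : l.length = 9) :
    (if (PySem.Set.ofList l).length == 9 then true else false) = koikErinevad l := by
  by_cases hn : l.Nodup
  · rw [PySem.Set.ofList_eq_self_of_nodup l hn, h9, (koikErinevad_iff l).mpr hn]
    simp
  · have hne : (PySem.Set.ofList l).length ≠ 9 := fun h => hn ((ofList_len_iff l).mp (h9 ▸ h))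
    rw [if_neg (by simpa using hne)]
    have : ¬ koikErinevad l = true := fun h => hn ((koikErinevad_iff l).mp h)
    exact (Bool.not_eq_true _ ▸ this).symm

-- range(n-3, n) is the explicit three-element list.
lemma pyRange_three (n : Int) :
    PySem.List.pyRange (n - 3) n 1 = [n - 3, n - 3 + 1, n - 3 + 1 + 1] := by
  rw [PySem.List.pyRange_one_cons (by omega), PySem.List.pyRange_one_cons (by omega),
      PySem.List.pyRange_one_cons (by omega), PySem.List.pyRange_one_eq_nil (by omega)]

-- ===== VERDICT (by name: the statement is the Claim_ definition above) =====
theorem ruut_3x3_on_korras_spec : Claim_equal_ruut_3x3_on_korras := by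
  intro tabel r c _ _
  unfold Spec_ruut_3x3_on_korras ruut_3x3_on_korras ruut_3x3_on_korras_alt
  rw [pyRange_three r, pyRange_three c,
      show PySem.List.pyRange 0 9 1 = [0, 1, 2, 3, 4, 5, 6, 7, 8] from by decide]
  simp only [List.foldl_cons, List.foldl_nil, List.map_cons, List.map_nil,
    List.nil_append, List.cons_append, List.append_assoc,
    show PySem.Int.floordiv (0:Int) 3 = 0 from by decide,
    show PySem.Int.floordiv (1:Int) 3 = 0 from by decide,
    show PySem.Int.floordiv (2:Int) 3 = 0 from by decide,
    show PySem.Int.floordiv (3:Int) 3 = 1 from by decide,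
    show PySem.Int.floordiv (4:Int) 3 = 1 from by decide,
    show PySem.Int.floordiv (5:Int) 3 = 1 from by decide,
    show PySem.Int.floordiv (6:Int) 3 = 2 from by decide,
    show PySem.Int.floordiv (7:Int) 3 = 2 from by decide,
    show PySem.Int.floordiv (8:Int) 3 = 2 from by decide,
    show PySem.Int.mod (0:Int) 3 = 0 from by decide,
    show PySem.Int.mod (1:Int) 3 = 1 from by decide,
    show PySem.Int.mod (2:Int) 3 = 2 from by decide,
    show PySem.Int.mod (3:Int) 3 = 0 from by decide,
    show PySem.Int.mod (4:Int) 3 = 1 from by decide,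
    show PySem.Int.mod (5:Int) 3 = 2 from by decide,
    show PySem.Int.mod (6:Int) 3 = 0 from by decide,
    show PySem.Int.mod (7:Int) 3 = 1 from by decide,
    show PySem.Int.mod (8:Int) 3 = 2 from by decide]
  ring_nf
  exact core_eq _ rfl
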